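-- pv_equiv track=rewrite | github.com/rsedxcftvgyhbujnkiqwe/AOC | day14/code.py | count_grid
-- ===== SOURCE A (Python) =====
-- def count_grid(grid):
--     total = 0
--     row_vals = [x+1 for x in reversed(range(len(grid)))]
--     for i,row in enumerate(grid):
--         for j,val in enumerate(row):
--             if val == "O":
--                 total += row_vals[i]
--     return total
-- ===== SOURCE B (Python) =====
-- def count_grid(grid):
--     total = 0
--     seen = 0
--     for row in grid:
--         seen += row.count("O")
--         total += seen
--     return total
-- ===== Notes on version B (the rewrite author's own statement) =====
-- stated objective: simpler
-- what changed: B replaces A's precomputed per-row weight table and enumerate-indexed lookup by a single running prefix counter of 'O' cells added into the total each row (row i's weight n-i equals the number of rows at or below it), never building row_vals or using len(grid).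
import Mathlib
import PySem

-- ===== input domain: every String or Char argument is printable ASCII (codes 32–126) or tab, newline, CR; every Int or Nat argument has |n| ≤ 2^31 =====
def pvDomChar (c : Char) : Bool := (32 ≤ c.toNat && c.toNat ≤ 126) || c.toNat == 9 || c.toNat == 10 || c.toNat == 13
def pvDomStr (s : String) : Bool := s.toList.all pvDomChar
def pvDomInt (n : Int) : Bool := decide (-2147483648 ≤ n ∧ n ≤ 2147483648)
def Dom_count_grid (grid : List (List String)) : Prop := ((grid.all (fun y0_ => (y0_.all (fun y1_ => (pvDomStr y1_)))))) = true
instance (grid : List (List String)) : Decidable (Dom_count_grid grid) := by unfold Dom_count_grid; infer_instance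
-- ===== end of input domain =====

-- B replaces A's per-row weight table + indexed lookup by a running prefix counter of 'O' cells; same value, different decomposition.

-- ===== PORT A =====
-- row_vals[i] is always in range (i < len(grid)), so the pyGetD default 0 is never used.
def count_grid (grid : List (List String)) : Int :=
  let row_vals : List Int :=
    ((PySem.List.pyRange 0 (grid.length : Int) 1).reverse).map (fun x => x + 1)
  (PySem.List.enumerate grid 0).foldl
    (fun total p =>
      (PySem.List.enumerate p.2 0).foldl
        (fun t q => if q.2 == "O" then t + PySem.List.pyGetD row_vals p.1 0 else t)
        total)
    0

-- ===== PORT B =====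
-- state (seen, total), one pass over the rows
def count_grid_alt (grid : List (List String)) : Int :=
  (grid.foldl
    (fun (p : Int × Int) row =>
      let seen := p.1 + (PySem.List.count row "O" : Int)
      (seen, p.2 + seen))
    (0, 0)).2

-- ===== PRECONDITION & SPEC =====
def Spec_count_grid (grid : List (List String)) (out : Int) : Prop := out = count_grid_alt grid
instance (grid : List (List String)) (out : Int) : Decidable (Spec_count_grid grid out) := by unfold Spec_count_grid; infer_instance

-- ===== CLAIM (what is proved, stated in full; the proofs are below) =====
def Claim_equal_count_grid : Prop := ∀ (grid : List (List String)), Dom_count_grid grid → Spec_count_grid grid (count_grid grid)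

-- ===== LEMMAS AND PROOFS =====

-- number of "O" cells in a row, as an Int
def cO (row : List String) : Int := (row.count "O" : Int)

-- the common value: sum of cO(row i) * (n - i)
def wsum : List (List String) → Int
  | [] => 0
  | r :: g => cO r * (g.length + 1) + wsum g

-- inner loop of A: adds w per "O" cell (index unused)
theorem inner_fold (row : List String) (k t w : Int) :
    (PySem.List.enumerate row k).foldl
      (fun t q => if q.2 == "O" then t + w else t) t = t + w * cO row := by
  induction row generalizing k t with
  | nil => simp [PySem.List.enumerate_nil, cO]
  | cons x xs ih =>
      simp only [PySem.List.enumerate_cons, List.foldl_cons, ih]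
      by_cases h : x = "O" <;> simp [h, cO] <;> try ring

-- outer loop of A, for any weight list rv agreeing with n - i on the enumerated indices
theorem outer_fold (g : List (List String)) (rv : List Int) (k : Nat) (t : Int)
    (h : ∀ j : Nat, j < g.length → PySem.List.pyGetD rv ((k + j : Nat) : Int) 0 = (g.length - j : Int)) :
    (PySem.List.enumerate g (k : Int)).foldl
      (fun total p =>
        (PySem.List.enumerate p.2 0).foldl
          (fun t q => if q.2 == "O" then t + PySem.List.pyGetD rv p.1 0 else t)
          total)
      t = t + wsum g := by
  induction g generalizing k t with
  | nil => simp [PySem.List.enumerate_nil, wsum]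
  | cons r g' ih =>
      simp only [PySem.List.enumerate_cons, List.foldl_cons, inner_fold] at ih ⊢
      have hk : ((k : Int) + 1) = ((k + 1 : Nat) : Int) := by push_cast; ring
      rw [hk, ih (k + 1) _ (fun j hj => by
        have := h (j + 1) (by simpa using Nat.succ_lt_succ hj)
        simp only [List.length_cons] at this ⊢
        have harg : ((k + (j + 1) : Nat) : Int) = ((k + 1 + j : Nat) : Int) := by push_cast; ring
        rw [harg] at this
        rw [this]; push_cast; ring)]
      have h0 := h 0 (by simp)
      simp only [Nat.add_zero, List.length_cons] at h0
      rw [h0]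
      simp only [wsum]
      push_cast
      ring

-- the weight table of A: rv[j] = n - j for j < n
theorem row_vals_get (n : Nat) (j : Nat) (hj : j < n) :
    PySem.List.pyGetD (((PySem.List.pyRange 0 (n : Int) 1).reverse).map (fun x => x + 1)) (j : Int) 0
      = (n - j : Int) := by
  have hlen : (((PySem.List.pyRange 0 (n : Int) 1).reverse).map (fun x => x + 1)).length = n := by
    simp [PySem.List.length_pyRange_one]
  rw [PySem.List.pyGetD_natCast, List.getD_eq_getElem _ _ (by omega : j < (((PySem.List.pyRange 0 (n : Int) 1).reverse).map (fun x => x + 1)).length)]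
  rw [List.getElem_map, List.getElem_reverse, PySem.List.getElem_pyRange_one]
  have hl : (PySem.List.pyRange 0 (n : Int) 1).length = n := by
    simp [PySem.List.length_pyRange_one]
  simp only [hl]
  omega

-- B's fold, fully generalized state
theorem b_fold (g : List (List String)) (s t : Int) :
    g.foldl (fun (p : Int × Int) row =>
        (p.1 + (PySem.List.count row "O" : Int), p.2 + (p.1 + (PySem.List.count row "O" : Int)))) (s, t)
      = (s + (g.map cO).sum, t + g.length * s + wsum g) := by
  induction g generalizing s t with
  | nil => simp [wsum]
  | cons r g' ih =>
      rw [List.foldl_cons, ih]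
      simp only [List.map_cons, List.sum_cons, List.length_cons, wsum, PySem.List.count_eq, cO,
        Prod.mk.injEq]
      constructor <;> push_cast <;> ring

theorem a_eq_wsum (grid : List (List String)) : count_grid grid = wsum grid := by
  unfold count_grid
  have h := outer_fold grid
    (((PySem.List.pyRange 0 (grid.length : Int) 1).reverse).map (fun x => x + 1)) 0 0
    (fun j hj => by
      have := row_vals_get grid.length j hj
      simpa using this)
  simpa using h

theorem b_eq_wsum (grid : List (List String)) : count_grid_alt grid = wsum grid := by
  unfold count_grid_alt
  have h := b_fold grid 0 0
  rw [show (fun (p : Int × Int) row =>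
        let seen := p.1 + (PySem.List.count row "O" : Int); (seen, p.2 + seen))
      = (fun (p : Int × Int) row =>
        (p.1 + (PySem.List.count row "O" : Int), p.2 + (p.1 + (PySem.List.count row "O" : Int)))) from rfl]
  rw [h]; simp

-- ===== VERDICT (by name: the statement is the Claim_ definition above) =====
theorem count_grid_spec : Claim_equal_count_grid := by
  intro grid _
  unfold Spec_count_grid
  rw [a_eq_wsum, b_eq_wsum]
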